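-- pv_equiv track=rewrite | github.com/TheDarkLightX/TauLang-Experiments | scripts/run_qelim_nonpure_bdd_corpus.py | canonical_stdout
-- ===== SOURCE A (Python) =====
-- def strip_outer_parens(text: str) -> str:
--     text = text.strip()
--     while text.startswith("(") and text.endswith(")"):
--         depth = 0
--         wraps = True
--         for i, ch in enumerate(text):
--             if ch == "(":
--                 depth += 1
--             elif ch == ")":
--                 depth -= 1
--                 if depth == 0 and i != len(text) - 1:
--                     wraps = False
--                     break
--         if not wraps:
--             return text
--         text = text[1:-1].strip()
--     return text
--
-- def split_top(text: str, op: str) -> list[str]: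
--     parts: list[str] = []
--     depth = 0
--     start = 0
--     i = 0
--     while i < len(text):
--         ch = text[i]
--         if ch == "(":
--             depth += 1
--             i += 1
--             continue
--         if ch == ")":
--             depth -= 1
--             i += 1
--             continue
--         if depth == 0 and text.startswith(op, i):
--             parts.append(text[start:i].strip())
--             i += len(op)
--             start = i
--             continue
--         i += 1
--     if parts:
--         parts.append(text[start:].strip())
--     return parts
--
-- def canonical_formula(text: str) -> str:
--     text = strip_outer_parens(text)
--     for op in [" || ", " && "]:
--         parts = split_top(text, op)
--         if parts:
--             canon = sorted(canonical_formula(part) for part in parts)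
--             return "(" + op.strip().join(canon) + ")"
--     return text
--
-- def canonical_stdout(stdout: str) -> str:
--     lines = []
--     for line in stdout.strip().splitlines():
--         if line.startswith("[") or "Experimental qelim BDD backend rejected" in line:
--             continue
--         if line.startswith("%1:"):
--             lines.append("%1: " + canonical_formula(line.removeprefix("%1:").strip()))
--         else:
--             lines.append(line)
--     return "\n".join(lines)
-- ===== SOURCE B (Python) =====
-- # B: canonicalization via a precomputed paren-depth prefix array and position-based
-- # splitting (cut index lists + slicing), instead of A's stateful scan-and-accumulate.
--
-- def _wraps(text: str) -> bool:
--     # outer parens wrap the whole text iff the depth stays positive strictly inside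
--     d = 0
--     for ch in text[:-1]:
--         d += (ch == "(") - (ch == ")")
--         if d <= 0:
--             return False
--     return True
--
-- def _unwrap(text: str) -> str:
--     text = text.strip()
--     while text.startswith("(") and text.endswith(")") and _wraps(text):
--         text = text[1:-1].strip()
--     return text
--
-- def _depths(text: str) -> list[int]:
--     # depths[j] = paren depth just before text[j]
--     depths = [0] * (len(text) + 1)
--     d = 0
--     for j, ch in enumerate(text):
--         depths[j] = d
--         d += (ch == "(") - (ch == ")")
--     depths[len(text)] = d
--     return depths
--
-- def _cuts(text: str, op: str, depths: list[int]) -> list[int]: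
--     cuts: list[int] = []
--     for j in range(len(text)):
--         if depths[j] == 0 and text[j:j + len(op)] == op and (not cuts or j >= cuts[-1] + len(op)):
--             cuts.append(j)
--     return cuts
--
-- def _pieces(text: str, op: str, cuts: list[int]) -> list[str]:
--     prev = 0
--     out: list[str] = []
--     for c in cuts:
--         out.append(text[prev:c].strip())
--         prev = c + len(op)
--     out.append(text[prev:].strip())
--     return out
--
-- def _canon(text: str) -> str:
--     text = _unwrap(text)
--     depths = _depths(text)
--     for op in (" || ", " && "):
--         cuts = _cuts(text, op, depths)
--         if cuts:
--             rendered = sorted(_canon(p) for p in _pieces(text, op, cuts))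
--             return "(" + op.strip().join(rendered) + ")"
--     return text
--
-- def canonical_stdout(stdout: str) -> str:
--     lines = []
--     for line in stdout.strip().splitlines():
--         if line.startswith("[") or "Experimental qelim BDD backend rejected" in line:
--             continue
--         lines.append("%1: " + _canon(line[3:].strip()) if line.startswith("%1:") else line)
--     return "\n".join(lines)
-- ===== Notes on version B (the rewrite author's own statement) =====
-- stated objective: alternative
-- what changed: B replaces A's stateful splitter (one index/depth/start/parts scan per operator with skip-ahead and a break-flag paren-wrap test) by a precomputed paren-depth prefix array shared by both operators, a position-list pass that collects cut indices, and a separate slicing step; the wrap test becomes a check that the running depth never drops to zero before the last character.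
import Mathlib
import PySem

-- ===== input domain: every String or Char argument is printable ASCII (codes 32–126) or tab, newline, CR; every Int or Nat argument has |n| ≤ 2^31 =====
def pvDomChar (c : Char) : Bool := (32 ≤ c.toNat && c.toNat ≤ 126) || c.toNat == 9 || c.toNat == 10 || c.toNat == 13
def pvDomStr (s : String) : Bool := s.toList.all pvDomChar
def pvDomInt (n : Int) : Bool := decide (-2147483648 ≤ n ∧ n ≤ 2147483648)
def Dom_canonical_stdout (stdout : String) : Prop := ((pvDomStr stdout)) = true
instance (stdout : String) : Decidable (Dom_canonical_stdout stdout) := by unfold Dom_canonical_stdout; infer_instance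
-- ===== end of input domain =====

-- B canonicalizes with a precomputed paren-depth prefix array and position-list splitting
-- (cut indices, then slicing) instead of A's stateful scan-and-accumulate splitter;
-- objective: alternative (same asymptotic cost).

-- termination helpers for the outer-paren stripping loops of BOTH ports (cited in decreasing_by)
theorem pvStripLen (s : List Char) : (PySem.Chars.strip s).length ≤ s.length := by
  simp only [PySem.Chars.strip, PySem.Chars.rstrip, PySem.Chars.lstrip]
  calc (List.dropWhile PySem.Chars.isspace
          (List.dropWhile PySem.Chars.isspace s).reverse).reverse.length
      ≤ (List.dropWhile PySem.Chars.isspace s).reverse.length := by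
        rw [List.length_reverse]; exact List.length_dropWhile_le _ _
    _ ≤ s.length := by rw [List.length_reverse]; exact List.length_dropWhile_le _ _

theorem pvInnerLen (t : List Char) (ht : t ≠ []) :
    (PySem.Chars.strip (PySem.Chars.slice t (some 1) (some (-1)))).length < t.length := by
  have h1 := pvStripLen (PySem.Chars.slice t (some 1) (some (-1)))
  have h2 : (PySem.Chars.slice t (some 1) (some (-1))).length
      = PySem.List.clampIdx t.length (-1) - PySem.List.clampIdx t.length 1 := by
    simp only [PySem.Chars.slice_eq_listSlice]
    exact PySem.List.length_slice t 1 (-1)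
  have h3 : PySem.List.clampIdx t.length (-1) = t.length - 1 := PySem.List.clampIdx_neg_one _
  have h4 : PySem.List.clampIdx t.length 1 = min 1 t.length := by
    exact_mod_cast PySem.List.clampIdx_natCast t.length 1
  have h5 : 0 < t.length := List.length_pos_iff.mpr ht
  omega

-- ===== PORT A =====
-- strip_outer_parens: inner for-loop; Python's `i != len(text)-1` is `rest ≠ []`
def wrapsA : List Char → Int → Bool
  | [], _ => true
  | c :: rest, depth =>
    if c = '(' then wrapsA rest (depth + 1)
    else if c = ')' then
      if depth - 1 = 0 ∧ rest ≠ [] then false else wrapsA rest (depth - 1)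
    else wrapsA rest depth

def stripLoopA (t : List Char) : List Char :=
  if PySem.Chars.startswith t ['('] ∧ PySem.Chars.endswith t [')'] then
    if wrapsA t 0 then
      stripLoopA (PySem.Chars.strip (PySem.Chars.slice t (some 1) (some (-1))))  -- text[1:-1].strip()
    else t
  else t
  termination_by t.length
  decreasing_by
    rename_i h _
    exact pvInnerLen t (by rintro rfl; simp [PySem.Chars.startswith] at h)

def stripOuterA (t : List Char) : List Char := stripLoopA (PySem.Chars.strip t)

-- split_top's while loop; text[start:i] is (t.drop start).take (i - start) (start ≤ i always)
def splitTopGo (t op : List Char) (hop : 0 < op.length) :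
    Nat → Int → Nat → List (List Char) → List (List Char)
  | i, depth, start, parts =>
    if h : i < t.length then
      if t[i] = '(' then splitTopGo t op hop (i + 1) (depth + 1) start parts
      else if t[i] = ')' then splitTopGo t op hop (i + 1) (depth - 1) start parts
      else if depth = 0 ∧ PySem.Chars.startswith (t.drop i) op then
        splitTopGo t op hop (i + op.length) depth (i + op.length)
          (parts ++ [PySem.Chars.strip ((t.drop start).take (i - start))])
      else splitTopGo t op hop (i + 1) depth start parts
    else if parts = [] then [] else parts ++ [PySem.Chars.strip (t.drop start)]
  termination_by i => t.length - i
  decreasing_by all_goals omega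

def splitTopA (t op : List Char) (hop : 0 < op.length) : List (List Char) :=
  splitTopGo t op hop 0 0 0 []

def pvOrOp : List Char := [' ', '|', '|', ' ']
def pvAndOp : List Char := [' ', '&', '&', ' ']
theorem pvOrOp_pos : 0 < pvOrOp.length := by decide
theorem pvAndOp_pos : 0 < pvAndOp.length := by decide

-- canonical_formula; fuel = |text| + 1 bounds the recursion depth (each recursive
-- argument is strictly shorter), so the fuel-0 branch is never reached from the entry call
def canonFormA : Nat → List Char → List Char
  | 0, t => t
  | fuel + 1, t =>
    let t := stripOuterA t
    match splitTopA t pvOrOp pvOrOp_pos with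
    | [] =>
      match splitTopA t pvAndOp pvAndOp_pos with
      | [] => t
      | parts =>
        '(' :: (PySem.Chars.join ['&', '&']
          (PySem.List.sorted (parts.map (canonFormA fuel)) (fun x => x) false)) ++ [')']
    | parts =>
      '(' :: (PySem.Chars.join ['|', '|']
        (PySem.List.sorted (parts.map (canonFormA fuel)) (fun x => x) false)) ++ [')']

def pvRejMsg : List Char := "Experimental qelim BDD backend rejected".toList

def canonical_stdout (stdout : String) : String :=
  let lines := (PySem.Chars.splitlines (PySem.Chars.strip stdout.toList)).foldl
    (fun acc line =>
      if PySem.Chars.startswith line ['['] || PySem.Chars.isIn pvRejMsg line then acc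
      else if PySem.Chars.startswith line ['%', '1', ':'] then
        -- removeprefix("%1:").strip(); the prefix is present here, so it is line.drop 3
        let s := PySem.Chars.strip (line.drop 3)
        acc ++ [['%', '1', ':', ' '] ++ canonFormA (s.length + 1) s]
      else acc ++ [line]) []
  String.ofList (PySem.Chars.join ['\n'] lines)

-- ===== PORT B =====
-- _wraps: depth stays positive strictly inside; loop over text[:-1]
def wrapsGoB : List Char → Int → Bool
  | [], _ => true
  | c :: rest, d =>
    let d := d + (if c = '(' then 1 else 0) - (if c = ')' then 1 else 0)
    if d ≤ 0 then false else wrapsGoB rest d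

def wrapsB (t : List Char) : Bool := wrapsGoB t.dropLast 0

def unwrapLoopB (t : List Char) : List Char :=
  if PySem.Chars.startswith t ['('] ∧ PySem.Chars.endswith t [')'] ∧ wrapsB t then
    unwrapLoopB (PySem.Chars.strip (PySem.Chars.slice t (some 1) (some (-1))))
  else t
  termination_by t.length
  decreasing_by
    rename_i h
    exact pvInnerLen t (by rintro rfl; simp [PySem.Chars.startswith] at h)

def unwrapB (t : List Char) : List Char := unwrapLoopB (PySem.Chars.strip t)

-- _depths: depths[j] = paren depth just before text[j] (length |t|+1)
def depthsGo : List Char → Int → List Int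
  | [], d => [d]
  | c :: rest, d =>
    d :: depthsGo rest (d + (if c = '(' then 1 else 0) - (if c = ')' then 1 else 0))

def depthsB (t : List Char) : List Int := depthsGo t 0

-- _cuts: one pass over all positions, kept cut must start ≥ previous cut + |op|
def cutsB (t op : List Char) (depths : List Int) : List Nat :=
  (List.range t.length).foldl
    (fun cuts j =>
      if depths.getD j 0 = 0 ∧ (t.drop j).take op.length = op ∧
          (match cuts.getLast? with
           | none => true
           | some l => decide (l + op.length ≤ j)) = true
      then cuts ++ [j] else cuts) []

-- _pieces: slice between consecutive cuts
def piecesGo (t op : List Char) : List Nat → Nat → List (List Char) → List (List Char)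
  | [], prev, out => out ++ [PySem.Chars.strip (t.drop prev)]
  | c :: cs, prev, out =>
    piecesGo t op cs (c + op.length)
      (out ++ [PySem.Chars.strip ((t.drop prev).take (c - prev))])

def piecesB (t op : List Char) (cuts : List Nat) : List (List Char) :=
  piecesGo t op cuts 0 []

-- _canon; same fuel convention as the A port (fuel = |text| + 1 at the entry call)
def canonFormB : Nat → List Char → List Char
  | 0, t => t
  | fuel + 1, t =>
    let t := unwrapB t
    let depths := depthsB t
    match cutsB t pvOrOp depths with
    | [] =>
      match cutsB t pvAndOp depths with
      | [] => t
      | cs =>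
        '(' :: (PySem.Chars.join ['&', '&']
          (PySem.List.sorted ((piecesB t pvAndOp cs).map (canonFormB fuel)) (fun x => x) false)) ++ [')']
    | cs =>
      '(' :: (PySem.Chars.join ['|', '|']
        (PySem.List.sorted ((piecesB t pvOrOp cs).map (canonFormB fuel)) (fun x => x) false)) ++ [')']

def canonical_stdout_alt (stdout : String) : String :=
  let lines := (PySem.Chars.splitlines (PySem.Chars.strip stdout.toList)).foldl
    (fun acc line =>
      if PySem.Chars.startswith line ['['] || PySem.Chars.isIn pvRejMsg line then acc
      else acc ++ [if PySem.Chars.startswith line ['%', '1', ':'] then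
          ['%', '1', ':', ' '] ++
            canonFormB ((PySem.Chars.strip (line.drop 3)).length + 1)
              (PySem.Chars.strip (line.drop 3))
        else line]) []
  String.ofList (PySem.Chars.join ['\n'] lines)

-- ===== PRECONDITION & SPEC =====
def Spec_canonical_stdout (stdout : String) (out : String) : Prop := out = canonical_stdout_alt stdout
instance (stdout : String) (out : String) : Decidable (Spec_canonical_stdout stdout out) := by unfold Spec_canonical_stdout; infer_instance

-- ===== CLAIM (what is proved, stated in full; the proofs are below) =====
def Claim_equal_canonical_stdout : Prop := ∀ (stdout : String), Dom_canonical_stdout stdout → Spec_canonical_stdout stdout (canonical_stdout stdout)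

-- ===== LEMMAS AND PROOFS =====

theorem pvOrOp_np : ∀ c ∈ pvOrOp, c ≠ '(' ∧ c ≠ ')' := by
  intro c hc
  simp only [pvOrOp, List.mem_cons] at hc
  rcases hc with rfl | rfl | rfl | rfl | h <;> simp_all
theorem pvAndOp_np : ∀ c ∈ pvAndOp, c ≠ '(' ∧ c ≠ ')' := by
  intro c hc
  simp only [pvAndOp, List.mem_cons] at hc
  rcases hc with rfl | rfl | rfl | rfl | h <;> simp_all
theorem pvOrOp_sp : ∃ o, pvOrOp = ' ' :: o := ⟨['|', '|', ' '], rfl⟩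
theorem pvAndOp_sp : ∃ o, pvAndOp = ' ' :: o := ⟨['&', '&', ' '], rfl⟩

-- ---- the outer-paren strip of A equals B's ----
theorem wrapsA_cons (c : Char) (rest : List Char) (d : Int) :
    wrapsA (c :: rest) d = (if c = '(' then wrapsA rest (d + 1)
      else if c = ')' then
        (if d - 1 = 0 ∧ rest ≠ [] then false else wrapsA rest (d - 1))
      else wrapsA rest d) := rfl

theorem wrapsGoB_cons (c : Char) (rest : List Char) (d : Int) :
    wrapsGoB (c :: rest) d =
      (if d + (if c = '(' then 1 else 0) - (if c = ')' then 1 else 0) ≤ 0 then false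
       else wrapsGoB rest (d + (if c = '(' then 1 else 0) - (if c = ')' then 1 else 0))) := rfl

theorem wrapsA_one (c : Char) (d : Int) : wrapsA [c] d = true := by
  rw [wrapsA_cons]
  split_ifs with h1 h2 h3 <;> first | rfl | simp_all

theorem wrapsGo_eq : ∀ (cs : List Char) (d : Int), 1 ≤ d → wrapsA cs d = wrapsGoB cs.dropLast d := by
  intro cs
  induction cs with
  | nil => intro d _; rfl
  | cons c rest ih =>
    intro d hd
    cases rest with
    | nil => rw [List.dropLast_singleton]; exact wrapsA_one c d
    | cons r rs =>
      have hdl : (c :: r :: rs).dropLast = c :: (r :: rs).dropLast := rfl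
      rw [hdl, wrapsA_cons, wrapsGoB_cons]
      by_cases h1 : c = '('
      · rw [if_pos h1, if_pos h1, if_neg (show ¬ c = ')' by simp [h1]),
          if_neg (by omega : ¬ d + 1 - 0 ≤ 0)]
        have : d + 1 - 0 = d + 1 := by ring
        rw [this]
        exact ih (d + 1) (by omega)
      · rw [if_neg h1, if_neg h1]
        by_cases h2 : c = ')'
        · rw [if_pos h2, if_pos h2]
          have e : d + 0 - 1 = d - 1 := by ring
          rw [e]
          by_cases h3 : d - 1 = 0
          · rw [if_pos ⟨h3, by simp⟩, if_pos (by omega)]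
          · rw [if_neg (by simp [h3]), if_neg (by omega)]
            exact ih (d - 1) (by omega)
        · rw [if_neg h2, if_neg h2]
          have e : d + 0 - 0 = d := by ring
          rw [e, if_neg (by omega)]
          exact ih d (by omega)

theorem wraps_eq (t : List Char) (h : PySem.Chars.startswith t ['('] = true) :
    wrapsA t 0 = wrapsB t := by
  obtain ⟨t', rfl⟩ : ∃ t', t = '(' :: t' := by
    obtain ⟨u, hu⟩ := (PySem.Chars.startswith_iff t ['(']).mp h
    exact ⟨u, hu.symm⟩
  cases t' with
  | nil => rfl
  | cons r rs =>
    have ha : wrapsA ('(' :: r :: rs) 0 = wrapsA (r :: rs) (0 + 1) := by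
      rw [wrapsA_cons, if_pos rfl]
    have hb : wrapsB ('(' :: r :: rs) = wrapsGoB ((r :: rs).dropLast) 1 := by
      show wrapsGoB ('(' :: (r :: rs).dropLast) 0 = _
      rw [wrapsGoB_cons]
      simp
    rw [ha, hb]
    exact wrapsGo_eq (r :: rs) 1 (by norm_num) |>.trans (by norm_num)

theorem stripLoop_eq (t : List Char) : stripLoopA t = unwrapLoopB t := by
  induction t using stripLoopA.induct with
  | case1 t h hw ih =>
    have hb : wrapsB t = true := (wraps_eq t h.1) ▸ hw
    rw [stripLoopA, unwrapLoopB, if_pos h, if_pos hw, if_pos ⟨h.1, h.2, hb⟩]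
    exact ih
  | case2 t h hw =>
    have hb : ¬ wrapsB t = true := by rw [← wraps_eq t h.1]; exact hw
    rw [stripLoopA, unwrapLoopB, if_pos h, if_neg hw, if_neg (by tauto)]
  | case3 t h =>
    rw [stripLoopA, unwrapLoopB, if_neg h, if_neg (by tauto)]

theorem stripOuter_eq (t : List Char) : stripOuterA t = unwrapB t :=
  stripLoop_eq (PySem.Chars.strip t)

-- ---- paren depth before position i, and the shared cut-position specification ----
def dAt (t : List Char) (i : Nat) : Int :=
  (((t.take i).count '(' : Nat) : Int) - ((t.take i).count ')' : Nat)

def cutsSpec (t op : List Char) (hop : 0 < op.length) : Nat → List Nat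
  | i =>
    if h : i < t.length then
      if dAt t i = 0 ∧ op <+: t.drop i then i :: cutsSpec t op hop (i + op.length)
      else cutsSpec t op hop (i + 1)
    else []
  termination_by i => t.length - i
  decreasing_by all_goals omega

def render (t op : List Char) : Nat → List Nat → List (List Char)
  | start, [] => [PySem.Chars.strip (t.drop start)]
  | start, c :: cs =>
    PySem.Chars.strip ((t.drop start).take (c - start)) :: render t op (c + op.length) cs

theorem dAt_zero (t : List Char) : dAt t 0 = 0 := by simp [dAt]

theorem dAt_add (t : List Char) (i k : Nat) :
    dAt t (i + k) = dAt t i + dAt (t.drop i) k := by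
  simp [dAt, List.take_add, List.count_append]
  ring

theorem dAt_full (op : List Char) (hnp : ∀ c ∈ op, c ≠ '(' ∧ c ≠ ')') :
    dAt op op.length = 0 := by
  have h1 : op.count '(' = 0 := by
    rw [List.count_eq_zero]; intro h; exact (hnp _ h).1 rfl
  have h2 : op.count ')' = 0 := by
    rw [List.count_eq_zero]; intro h; exact (hnp _ h).2 rfl
  simp [dAt, List.take_length, h1, h2]

theorem dAt_seg (t op : List Char) (i : Nat) (h : op <+: t.drop i)
    (hnp : ∀ c ∈ op, c ≠ '(' ∧ c ≠ ')') :
    dAt t (i + op.length) = dAt t i := by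
  rw [dAt_add]
  have htake : (t.drop i).take op.length = op := (List.prefix_iff_eq_take.mp h).symm
  have : dAt (t.drop i) op.length = 0 := by
    have := dAt_full op hnp
    simp only [dAt] at this ⊢
    rw [htake] at *
    rw [← htake] at this
    simpa [htake] using this
  omega

theorem dAt_step (t : List Char) (i : Nat) (h : i < t.length) :
    dAt t (i + 1) = dAt t i + (if t[i] = '(' then 1 else 0) - (if t[i] = ')' then 1 else 0) := by
  rw [dAt_add]
  have hd : t.drop i = t[i] :: t.drop (i + 1) := List.drop_eq_getElem_cons h
  have : dAt (t.drop i) 1 = (if t[i] = '(' then 1 else 0) - (if t[i] = ')' then 1 else 0) := by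
    rw [hd]
    simp only [dAt, List.take_succ_cons, List.take_zero]
    by_cases h1 : t[i] = '(' <;> by_cases h2 : t[i] = ')' <;> simp_all
  omega

-- ---- A's splitter realizes cutsSpec/render ----
theorem head_space (t : List Char) (i : Nat) (hi : i < t.length)
    (o u : List Char) (hu : (' ' :: o) ++ u = t.drop i) : t[i] = ' ' := by
  have h4 := (List.drop_eq_getElem_cons hi).symm.trans hu.symm
  have h5 := congrArg List.head? h4
  simp only [List.head?_cons] at h5
  simpa using h5

theorem splitTopGo_eq (t op : List Char) (hop : 0 < op.length)
    (hnp : ∀ c ∈ op, c ≠ '(' ∧ c ≠ ')') (hsp : ∃ o, op = ' ' :: o) :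
    ∀ n i start parts, t.length - i ≤ n →
    splitTopGo t op hop i (dAt t i) start parts =
      (match cutsSpec t op hop i with
      | [] => if parts = [] then [] else parts ++ [PySem.Chars.strip (t.drop start)]
      | cuts => parts ++ render t op start cuts) := by
  intro n
  induction n with
  | zero =>
    intro i start parts h
    have hi : ¬ i < t.length := by omega
    rw [splitTopGo, cutsSpec, dif_neg hi, dif_neg hi]
  | succ n ih =>
    intro i start parts h
    by_cases hi : i < t.length
    · rw [splitTopGo, cutsSpec, dif_pos hi, dif_pos hi]
      by_cases h1 : t[i] = '('
      · rw [if_pos h1]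
        have hns : ¬ (dAt t i = 0 ∧ op <+: t.drop i) := by
          rintro ⟨-, hp⟩
          obtain ⟨o, rfl⟩ := hsp
          obtain ⟨u, hu⟩ := hp
          have := head_space t i hi o u hu
          simp [this] at h1
        rw [if_neg hns]
        have hstep : dAt t i + 1 = dAt t (i + 1) := by
          rw [dAt_step t i hi, if_pos h1, if_neg (by simp [h1])]
          ring
        rw [hstep]
        exact ih (i + 1) start parts (by omega)
      · rw [if_neg h1]
        by_cases h2 : t[i] = ')'
        · rw [if_pos h2]
          have hns : ¬ (dAt t i = 0 ∧ op <+: t.drop i) := by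
            rintro ⟨-, hp⟩
            obtain ⟨o, rfl⟩ := hsp
            obtain ⟨u, hu⟩ := hp
            have := head_space t i hi o u hu
            simp [this] at h2
          rw [if_neg hns]
          have hstep : dAt t i - 1 = dAt t (i + 1) := by
            rw [dAt_step t i hi, if_neg h1, if_pos h2]
            ring
          rw [hstep]
          exact ih (i + 1) start parts (by omega)
        · rw [if_neg h2]
          by_cases h3 : dAt t i = 0 ∧ PySem.Chars.startswith (t.drop i) op = true
          · have hpre : op <+: t.drop i := (PySem.Chars.startswith_iff _ _).mp h3.2
            rw [if_pos h3, if_pos ⟨h3.1, hpre⟩]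
            have hseg : dAt t i = dAt t (i + op.length) := (dAt_seg t op i hpre hnp).symm
            rw [hseg]
            rw [ih (i + op.length) (i + op.length)
              (parts ++ [PySem.Chars.strip ((t.drop start).take (i - start))]) (by omega)]
            cases hc : cutsSpec t op hop (i + op.length) with
            | nil => simp [render, List.append_assoc]
            | cons c cs => simp [render, List.append_assoc]
          · have h3' : ¬ (dAt t i = 0 ∧ op <+: t.drop i) := by
              rintro ⟨ha, hb⟩
              exact h3 ⟨ha, (PySem.Chars.startswith_iff _ _).mpr hb⟩
            rw [if_neg h3, if_neg h3']
            have hstep : dAt t i = dAt t (i + 1) := by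
              rw [dAt_step t i hi, if_neg h1, if_neg h2]; ring
            rw [hstep]
            exact ih (i + 1) start parts (by omega)
    · rw [splitTopGo, cutsSpec, dif_neg hi, dif_neg hi]

theorem splitTopA_eq (t op : List Char) (hop : 0 < op.length)
    (hnp : ∀ c ∈ op, c ≠ '(' ∧ c ≠ ')') (hsp : ∃ o, op = ' ' :: o) :
    splitTopA t op hop =
      (match cutsSpec t op hop 0 with
      | [] => []
      | cuts => render t op 0 cuts) := by
  have h := splitTopGo_eq t op hop hnp hsp t.length 0 0 [] (by omega)
  rw [dAt_zero] at h
  rw [splitTopA, h]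
  cases cutsSpec t op hop 0 <;> simp

-- ---- B's depth array and cut collection realize cutsSpec ----
theorem dAt_cons (c : Char) (cs : List Char) (j : Nat) :
    dAt (c :: cs) (j + 1) = ((if c = '(' then 1 else 0) - (if c = ')' then 1 else 0)) + dAt cs j := by
  simp only [dAt, List.take_succ_cons, List.count_cons]
  by_cases h1 : c = '(' <;> by_cases h2 : c = ')' <;> simp_all <;> ring

theorem depthsGo_getD : ∀ (cs : List Char) (d : Int) (j : Nat), j ≤ cs.length →
    (depthsGo cs d).getD j 0 = d + dAt cs j := by
  intro cs
  induction cs with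
  | nil =>
    intro d j hj
    have : j = 0 := by simpa using hj
    subst this
    simp [depthsGo, dAt]
  | cons c rest ih =>
    intro d j hj
    cases j with
    | zero => simp [depthsGo, dAt]
    | succ j =>
      have : (depthsGo (c :: rest) d).getD (j + 1) 0
          = (depthsGo rest (d + (if c = '(' then 1 else 0) - (if c = ')' then 1 else 0))).getD j 0 := rfl
      rw [this, ih _ j (by simpa using hj), dAt_cons]
      ring

theorem depthsB_getD (t : List Char) (j : Nat) (hj : j ≤ t.length) :
    (depthsB t).getD j 0 = dAt t j := by
  have := depthsGo_getD t 0 j hj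
  simpa [depthsB] using this

theorem cutsB_eq (t op : List Char) (hop : 0 < op.length) :
    cutsB t op (depthsB t) = cutsSpec t op hop 0 := by
  have key : ∀ (k j : Nat) (acc : List Nat), j + k = t.length →
      ((match acc.getLast? with | none => True | some l => l + op.length ≤ j) →
        (List.range' j k).foldl
          (fun cuts j =>
            if (depthsB t).getD j 0 = 0 ∧ (t.drop j).take op.length = op ∧
                (match cuts.getLast? with
                 | none => true
                 | some l => decide (l + op.length ≤ j)) = true
            then cuts ++ [j] else cuts) acc = acc ++ cutsSpec t op hop j)
      ∧ (∀ l, acc.getLast? = some l → op <+: t.drop l → l < j → j < l + op.length →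
        (List.range' j k).foldl
          (fun cuts j =>
            if (depthsB t).getD j 0 = 0 ∧ (t.drop j).take op.length = op ∧
                (match cuts.getLast? with
                 | none => true
                 | some l => decide (l + op.length ≤ j)) = true
            then cuts ++ [j] else cuts) acc = acc ++ cutsSpec t op hop (l + op.length)) := by
    intro k
    induction k with
    | zero =>
      intro j acc hj
      constructor
      · intro _
        rw [List.range'_zero, List.foldl_nil, cutsSpec, dif_neg (by omega)]
        simp
      · intro l _ hpre hlj hjl
        exfalso
        have := hpre.length_le
        simp [List.length_drop] at this
        omega
    | succ k ih =>
      intro j acc hj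
      have hjlen : j < t.length := by omega
      constructor
      · -- free state (previous cut, if any, is at least |op| back)
        intro hfree
        rw [List.range'_succ, List.foldl_cons]
        by_cases hcond : dAt t j = 0 ∧ op <+: t.drop j
        · have htake : (t.drop j).take op.length = op := (List.prefix_iff_eq_take.mp hcond.2).symm
          have hguard : (match acc.getLast? with
               | none => true
               | some l => decide (l + op.length ≤ j)) = true := by
            cases hacc : acc.getLast? with
            | none => rfl
            | some l => rw [hacc] at hfree; simpa using hfree
          rw [if_pos ⟨by rw [depthsB_getD t j (by omega)]; exact hcond.1, htake, hguard⟩]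
          have hlast : (acc ++ [j]).getLast? = some j := by simp
          rw [cutsSpec, dif_pos hjlen, if_pos hcond]
          by_cases hL : op.length = 1
          · have := (ih (j + 1) (acc ++ [j]) (by omega)).1
            rw [hlast] at this
            rw [this (by omega), hL]
            simp
          · have := (ih (j + 1) (acc ++ [j]) (by omega)).2 j hlast hcond.2 (by omega) (by omega)
            rw [this]
            simp
        · have hcond' : ¬ ((depthsB t).getD j 0 = 0 ∧ (t.drop j).take op.length = op ∧
              (match acc.getLast? with
               | none => true
               | some l => decide (l + op.length ≤ j)) = true) := by
            rintro ⟨ha, hb, -⟩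
            rw [depthsB_getD t j (by omega)] at ha
            exact hcond ⟨ha, List.prefix_iff_eq_take.mpr hb.symm⟩
          rw [if_neg hcond']
          rw [cutsSpec, dif_pos hjlen, if_neg hcond]
          refine (ih (j + 1) acc (by omega)).1 ?_
          cases hacc : acc.getLast? with
          | none => trivial
          | some l => rw [hacc] at hfree; omega
      · -- cooldown state (inside the |op| chars of the previous cut)
        intro l hacc hpre hlj hjl
        rw [List.range'_succ, List.foldl_cons]
        rw [if_neg (by
          rintro ⟨-, -, hg⟩
          rw [hacc] at hg
          simp at hg
          omega)]
        by_cases hend : j + 1 = l + op.length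
        · have := (ih (j + 1) acc (by omega)).1
          rw [hacc] at this
          rw [this (by omega), hend]
        · exact (ih (j + 1) acc (by omega)).2 l hacc hpre (by omega) (by omega)
  have h0 := (key t.length 0 [] (by omega)).1 (by simp)
  simpa [cutsB, List.range_eq_range'] using h0

theorem piecesGo_eq (t op : List Char) :
    ∀ (cuts : List Nat) (prev : Nat) (out : List (List Char)),
    piecesGo t op cuts prev out = out ++ render t op prev cuts := by
  intro cuts
  induction cuts with
  | nil => intro prev out; simp [piecesGo, render]
  | cons c cs ih => intro prev out; simp [piecesGo, render, ih, List.append_assoc]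

theorem piecesB_eq (t op : List Char) (cuts : List Nat) :
    piecesB t op cuts = render t op 0 cuts := by
  rw [piecesB, piecesGo_eq]
  simp

-- ---- the canonical-formula recursions agree ----
theorem canonForm_eq : ∀ (fuel : Nat) (t : List Char), canonFormA fuel t = canonFormB fuel t := by
  intro fuel
  induction fuel with
  | zero => intro t; rfl
  | succ fuel ih =>
    intro t
    have hfun : canonFormA fuel = canonFormB fuel := funext ih
    simp only [canonFormA, canonFormB]
    rw [stripOuter_eq]
    rw [splitTopA_eq (unwrapB t) pvOrOp pvOrOp_pos pvOrOp_np pvOrOp_sp,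
        splitTopA_eq (unwrapB t) pvAndOp pvAndOp_pos pvAndOp_np pvAndOp_sp,
        cutsB_eq (unwrapB t) pvOrOp pvOrOp_pos,
        cutsB_eq (unwrapB t) pvAndOp pvAndOp_pos]
    cases h1 : cutsSpec (unwrapB t) pvOrOp pvOrOp_pos 0 with
    | cons c cs => simp [render, piecesB_eq, hfun]
    | nil =>
      cases h2 : cutsSpec (unwrapB t) pvAndOp pvAndOp_pos 0 with
      | nil => rfl
      | cons c cs => simp [render, piecesB_eq, hfun]

-- ===== VERDICT (by name: the statement is the Claim_ definition above) =====
theorem canonical_stdout_spec : Claim_equal_canonical_stdout := by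
  intro stdout _
  unfold Spec_canonical_stdout canonical_stdout canonical_stdout_alt
  refine congrArg String.ofList (congrArg (PySem.Chars.join ['\n']) ?_)
  apply PySem.List.foldl_congr_mem
  intro acc line _
  by_cases h1 : (PySem.Chars.startswith line ['['] || PySem.Chars.isIn pvRejMsg line) = true
  · simp [h1]
  · simp only [Bool.not_eq_true] at h1
    by_cases h2 : PySem.Chars.startswith line ['%', '1', ':'] = true
    · simp [h1, h2, canonForm_eq]
    · simp [h1, h2]
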